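-- pv_equiv track=rewrite | github.com/chrplr/PCBS | coding-exercises/Kaprekar-numbers.py | form_number
-- ===== SOURCE A (Python) =====
-- def form_number(list_of_digits, base=10):
--     """ returns the number represented by the digits passed as argument. """
--     number = 0
--     for digit in list_of_digits:
--         c = ord(digit)
--         if (c >= ord('0')) and (c <= ord('9')):
--             val = c - ord('0')
--         else:
--             val = 10 + c - ord('A')
--         number = number * base + val
--     return number
-- ===== SOURCE B (Python) =====
-- def form_number(list_of_digits, base=10):
--     """ returns the number represented by the digits passed as argument. """
--     total = 0
--     power = 1
--     for digit in reversed(list_of_digits):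
--         c = ord(digit)
--         if ord('0') <= c <= ord('9'):
--             val = c - ord('0')
--         else:
--             val = 10 + c - ord('A')
--         total += val * power
--         power *= base
--     return total
-- ===== Notes on version B (the rewrite author's own statement) =====
-- stated objective: alternative
-- what changed: Replaces the left-to-right Horner accumulation (number = number*base + val) by a reversed place-value traversal that keeps a running power of the base and sums val*power from the least-significant digit.
import Mathlib
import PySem

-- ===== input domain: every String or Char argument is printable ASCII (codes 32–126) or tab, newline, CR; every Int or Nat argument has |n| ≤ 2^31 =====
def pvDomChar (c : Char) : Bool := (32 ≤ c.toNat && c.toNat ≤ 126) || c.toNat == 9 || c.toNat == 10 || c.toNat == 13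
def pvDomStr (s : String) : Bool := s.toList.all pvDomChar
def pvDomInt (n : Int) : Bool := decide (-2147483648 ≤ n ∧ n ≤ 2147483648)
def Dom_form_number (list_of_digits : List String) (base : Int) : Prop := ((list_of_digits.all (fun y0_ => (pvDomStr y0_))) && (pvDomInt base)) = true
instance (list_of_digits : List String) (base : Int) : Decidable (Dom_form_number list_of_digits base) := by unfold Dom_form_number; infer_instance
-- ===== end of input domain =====

-- B replaces A's Horner accumulation by a reversed place-value traversal with a running power (objective: alternative).


-- ===== PORT A =====
-- ord(digit): exact for one-character strings (Pre_ guarantees that; other lists are outside Pre_ since ord raises TypeError)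
def form_number (list_of_digits : List String) (base : Int) : Int :=
  list_of_digits.foldl (fun number digit =>
    let c : Int := match digit.toList with | [ch] => (ch.toNat : Int) | _ => 0
    let val : Int := if 48 ≤ c ∧ c ≤ 57 then c - 48 else 10 + c - 65
    number * base + val) 0

-- ===== PORT B =====
-- ord(digit) plus Source B's digit-value branch; exact for one-character strings (Pre_)
def pvOrdVal (digit : String) : Int :=
  let c : Int := ((digit.toList.headD (Char.ofNat 0)).toNat : Int)
  if 48 ≤ c ∧ c ≤ 57 then c - 48 else 10 + c - 65

def form_number_alt (list_of_digits : List String) (base : Int) : Int :=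
  (list_of_digits.reverse.foldl (fun (st : Int × Int) digit =>
    (st.1 + pvOrdVal digit * st.2, st.2 * base)) (0, 1)).1

-- ===== PRECONDITION & SPEC =====
-- Pre_ excludes lists containing a string whose length is not 1: Python's ord raises TypeError there (in A and in B alike).
def Pre_form_number (list_of_digits : List String) (base : Int) : Prop :=
  ∀ s ∈ list_of_digits, s.toList.length = 1
instance (list_of_digits : List String) (base : Int) : Decidable (Pre_form_number list_of_digits base) := by unfold Pre_form_number; infer_instance

def pvWitness_form_number : List String × Int := (["1", "A", "7"], 16)

def Spec_form_number (list_of_digits : List String) (base : Int) (out : Int) : Prop := out = form_number_alt list_of_digits base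
instance (list_of_digits : List String) (base : Int) (out : Int) : Decidable (Spec_form_number list_of_digits base out) := by unfold Spec_form_number; infer_instance

-- ===== CLAIM (what is proved, stated in full; the proofs are below) =====
def Claim_equal_form_number : Prop := ∀ (list_of_digits : List String) (base : Int), Dom_form_number list_of_digits base → Pre_form_number list_of_digits base → Spec_form_number list_of_digits base (form_number list_of_digits base)

-- ===== LEMMAS AND PROOFS =====

-- A's digit-value computation as a standalone function (proof helper only)
def pvValA (digit : String) : Int :=
  let c : Int := match digit.toList with | [ch] => (ch.toNat : Int) | _ => 0
  if 48 ≤ c ∧ c ≤ 57 then c - 48 else 10 + c - 65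

-- the (total, power) pair computed from the right, with an arbitrary digit-value function
def pvPV (v : String → Int) (base : Int) (l : List String) : Int × Int :=
  l.foldr (fun digit st => (st.1 + v digit * st.2, st.2 * base)) (0, 1)

theorem pvAlt_eq_pv (l : List String) (base : Int) :
    form_number_alt l base = (pvPV pvOrdVal base l).1 := by
  simp [form_number_alt, pvPV, List.foldl_reverse]

theorem pvValA_eq_pvOrdVal (s : String) (h : s.toList.length = 1) :
    pvValA s = pvOrdVal s := by
  match hl : s.toList with
  | [ch] => simp [pvValA, pvOrdVal, hl]
  | [] => simp [hl] at h
  | a :: b :: t => simp [hl] at h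

theorem pvPV_congr (v w : String → Int) (base : Int) (l : List String)
    (h : ∀ s ∈ l, v s = w s) : pvPV v base l = pvPV w base l := by
  induction l with
  | nil => rfl
  | cons d t ih =>
    simp only [pvPV, List.foldr_cons] at *
    rw [ih (fun s hs => h s (List.mem_cons_of_mem d hs)), h d List.mem_cons_self]

theorem pvHorner_eq (base : Int) (l : List String) : ∀ n : Int,
    l.foldl (fun number digit =>
      let c : Int := match digit.toList with | [ch] => (ch.toNat : Int) | _ => 0
      let val : Int := if 48 ≤ c ∧ c ≤ 57 then c - 48 else 10 + c - 65
      number * base + val) n = n * (pvPV pvValA base l).2 + (pvPV pvValA base l).1 := by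
  induction l with
  | nil => intro n; simp [pvPV]
  | cons d t ih =>
    intro n
    have h : pvPV pvValA base (d :: t) =
        ((pvPV pvValA base t).1 + pvValA d * (pvPV pvValA base t).2,
         (pvPV pvValA base t).2 * base) := rfl
    rw [List.foldl_cons, ih, h]
    show (n * base + pvValA d) * (pvPV pvValA base t).2 + (pvPV pvValA base t).1 = _
    ring

-- ===== VERDICT (by name: the statement is the Claim_ definition above) =====
theorem form_number_spec : Claim_equal_form_number := by
  intro l base _ hpre
  unfold Spec_form_number
  rw [pvAlt_eq_pv, ← pvPV_congr pvValA pvOrdVal base l (fun s hs => pvValA_eq_pvOrdVal s (hpre s hs))]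
  simpa [form_number] using pvHorner_eq base l 0
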